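-- pv_equiv track=rewrite | github.com/metaspace2020/metaspace | metaspace/engine/pyMS/pyisocalc/pyisocalc.py | strip_bracket
-- ===== SOURCE A (Python) =====
-- def rm_1bracket(str_in):
--     # find first and last brackets
--     rb = str_in.index(')')
--     lb = str_in[0:rb].rindex('(')
--
--     # check if multiplier after last bracket
--     if len(str_in) == rb + 1:  # end of string
--         mult = "1"
--         mult_idx = 0
--     else:
--         mult = str_in[rb + 1]
--         mult_idx = 1
--     if not mult.isdigit():  # not a number
--         mult = '1'
--         mult_idx = 0
--     # exband brackets
--     str_tmp = ""
--     for m in range(0, int(mult)):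
--         str_tmp = str_tmp + str_in[lb + 1:rb]
--     if lb == 0:
--         str_strt = ""
--     else:
--         str_strt = str_in[0:lb]
--     if rb == len(str_in) - 1:
--         str_end = ""
--     else:
--         str_end = str_in[rb + 1 + mult_idx:]
--     return str_strt + str_tmp + str_end
--
-- def strip_bracket(str_in):
--     go = True
--     try:
--         while go == True:
--             str_in = rm_1bracket(str_in)
--     except ValueError as e:
--         if str(e) != "substring not found":
--             raise
--     return str_in
-- ===== SOURCE B (Python) =====
-- def strip_bracket(str_in):
--     # Single left-to-right pass with a stack of buffers: each bracket group is
--     # expanded once, instead of rescanning and rebuilding the whole string per pair.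
--     stack = [[]]
--     i = 0
--     n = len(str_in)
--     while i < n:
--         c = str_in[i]
--         if c == '(':
--             stack.append([])
--             i += 1
--         elif c == ')':
--             if len(stack) == 1:
--                 # no unmatched '(' before this ')': the original stops here
--                 stack[0].append(str_in[i:])
--                 break
--             content = ''.join(stack.pop())
--             if i + 1 < n and str_in[i + 1].isdigit():
--                 mult = int(str_in[i + 1])
--                 i += 2
--             else:
--                 mult = 1
--                 i += 1
--             stack[-1].append(content * mult)
--         else:
--             stack[-1].append(c)
--             i += 1
--     return '('.join(''.join(b) for b in stack)
-- ===== Notes on version B (the rewrite author's own statement) =====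
-- stated objective: alternative
-- what changed: Replaces the repeated rescan-and-rebuild loop (locate the first closing bracket and its opener, rebuild the whole string, restart from scratch) with a single left-to-right pass over the input that keeps a stack of output buffers and expands each bracket group when its closing bracket is reached.
import Mathlib
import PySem

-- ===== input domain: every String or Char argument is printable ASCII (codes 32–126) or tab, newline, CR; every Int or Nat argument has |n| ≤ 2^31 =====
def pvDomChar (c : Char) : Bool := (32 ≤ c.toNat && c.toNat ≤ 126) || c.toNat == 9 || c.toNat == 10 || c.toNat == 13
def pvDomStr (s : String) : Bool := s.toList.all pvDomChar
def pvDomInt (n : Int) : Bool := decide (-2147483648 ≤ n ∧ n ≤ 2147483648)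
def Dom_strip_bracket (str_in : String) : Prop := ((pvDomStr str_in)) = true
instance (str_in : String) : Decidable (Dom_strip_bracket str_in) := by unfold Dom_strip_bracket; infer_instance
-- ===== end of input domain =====

-- B replaces A's repeated rescan-and-rebuild loop by one left-to-right pass with a
-- stack of buffers (objective: alternative algorithm; expands each group once).

-- ===== PORT A =====
-- rm_1bracket: none = Python's ValueError "substring not found" (from .index / .rindex)
def rm_1bracket (s : List Char) : Option (List Char) :=
  let rb := PySem.Chars.find s [')']                      -- str_in.index(')')
  if rb = -1 then none else                               -- .index raises where find = -1
  let lb := PySem.Chars.rfind (PySem.List.slice s (some 0) (some rb)) ['(']  -- str_in[0:rb].rindex('(')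
  if lb = -1 then none else
  let mm : List Char × Int :=
    if (s.length : Int) = rb + 1 then (['1'], 0)
    else ([(PySem.List.pyGet? s (rb + 1)).getD '1'], 1)   -- str_in[rb+1]; in range: rb+1 < len here
  let mm : List Char × Int :=
    if PySem.Chars.strIsdigit mm.1 = false then (['1'], 0) else mm
  -- int(mult): mult is "1" or a single digit, so int() never raises
  let strTmp := (PySem.List.pyRange 0 ((PySem.Int.ofChars? mm.1).getD 1) 1).foldl
    (fun acc _ => acc ++ PySem.List.slice s (some (lb + 1)) (some rb)) []
  let strStrt := if lb = 0 then [] else PySem.List.slice s (some 0) (some lb)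
  let strEnd := if rb = (s.length : Int) - 1 then [] else PySem.List.slice s (some (rb + 1 + mm.2)) none
  some (strStrt ++ strTmp ++ strEnd)

-- the 'while' loop; fuel = length bounds the iterations (each successful
-- rm_1bracket removes one ')'), so this computes exactly Python's loop
def stripLoop : Nat → List Char → List Char
  | 0, s => s
  | fuel + 1, s =>
    match rm_1bracket s with
    | none => s
    | some t => stripLoop fuel t

def strip_bracket (str_in : String) : String :=
  String.ofList (stripLoop str_in.toList.length str_in.toList)

-- ===== PORT B =====
-- '('.join of the buffers, bottom of the stack first (stack head = innermost parent)
def joinStack (cur : List Char) (stack : List (List Char)) : List Char :=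
  List.intercalate ['('] ((cur :: stack).reverse)

def digitVal (c : Char) : Nat := c.toNat - 48   -- int(d) for a single ASCII digit d

def scanB : List Char → List Char → List (List Char) → List Char
  | [], cur, stack => joinStack cur stack
  | c :: rest, cur, stack =>
    if c = '(' then scanB rest [] (cur :: stack)
    else if c = ')' then
      match stack with
      | [] => cur ++ ')' :: rest                          -- no unmatched '(' : stop, keep the rest
      | parent :: stk =>
        match rest with
        | d :: rest' =>
          if PySem.Chars.isdigit d then
            scanB rest' (parent ++ (List.replicate (digitVal d) cur).flatten) stk
          else
            scanB (d :: rest') (parent ++ cur) stk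
        | [] => joinStack (parent ++ cur) stk             -- loop ends right after this ')'
    else scanB rest (cur ++ [c]) stack
  termination_by l _ _ => l.length
  decreasing_by all_goals simp

def strip_bracket_alt (str_in : String) : String :=
  String.ofList (scanB str_in.toList [] [])

-- ===== PRECONDITION & SPEC =====
def Spec_strip_bracket (str_in : String) (out : String) : Prop := out = strip_bracket_alt str_in
instance (str_in : String) (out : String) : Decidable (Spec_strip_bracket str_in out) := by unfold Spec_strip_bracket; infer_instance

-- ===== CLAIM (what is proved, stated in full; the proofs are below) =====
def Claim_equal_strip_bracket : Prop := ∀ (str_in : String), Dom_strip_bracket str_in → Spec_strip_bracket str_in (strip_bracket str_in)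

-- ===== LEMMAS AND PROOFS =====

-- state of B's scan after consuming a ')'-free chunk
def pushSt : List Char → List Char × List (List Char) → List Char × List (List Char)
  | [], st => st
  | c :: xs, (cur, stack) =>
    if c = '(' then pushSt xs ([], cur :: stack) else pushSt xs (cur ++ [c], stack)

theorem scan_push (xs : List Char) (h : ')' ∉ xs) :
    ∀ (ys cur : List Char) (stack : List (List Char)),
      scanB (xs ++ ys) cur stack = scanB ys (pushSt xs (cur, stack)).1 (pushSt xs (cur, stack)).2 := by
  induction xs with
  | nil => intro ys cur stack; simp [pushSt]
  | cons c xs ih =>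
    rw [List.mem_cons] at h
    push Not at h
    intro ys cur stack
    show scanB (c :: (xs ++ ys)) cur stack = _
    by_cases h1 : c = '('
    · subst h1
      rw [scanB.eq_def, pushSt]
      exact ih h.2 ys [] (cur :: stack)
    · rw [scanB.eq_def, pushSt]
      simp only [if_neg h1, if_neg (Ne.symm h.1)]
      exact ih h.2 ys (cur ++ [c]) stack

theorem push_plain (xs : List Char) (h1 : ')' ∉ xs) (h2 : '(' ∉ xs) :
    ∀ (cur : List Char) (stack : List (List Char)), pushSt xs (cur, stack) = (cur ++ xs, stack) := by
  induction xs with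
  | nil => intro cur stack; simp [pushSt]
  | cons c xs ih =>
    rw [List.mem_cons] at h1 h2
    push Not at h1 h2
    intro cur stack
    rw [pushSt]
    simp only [if_neg (Ne.symm h2.1)]
    rw [ih h1.2 h2.2]
    simp


theorem inter_snoc (sep : List Char) (x y : List Char) : ∀ (l : List (List Char)),
    (List.intersperse sep (l ++ [x ++ y])).flatten = (List.intersperse sep (l ++ [x])).flatten ++ y := by
  intro l
  induction l with
  | nil => simp
  | cons a l ih =>
    cases l with
    | nil => simp [List.intersperse]
    | cons b t =>
      simp only [List.cons_append] at *
      rw [List.intersperse_cons₂, List.intersperse_cons₂, List.flatten_cons,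
        List.flatten_cons, ih]
      simp

theorem inter_nil_snoc (sep : List Char) : ∀ (l : List (List Char)) (x : List Char),
    (List.intersperse sep ((l ++ [x]) ++ [([] : List Char)])).flatten
      = (List.intersperse sep (l ++ [x])).flatten ++ sep := by
  intro l
  induction l with
  | nil => intro x; simp [List.intersperse]
  | cons a l ih =>
    intro x
    cases l with
    | nil =>
      simp only [List.nil_append, List.cons_append, List.intersperse_cons₂,
        List.flatten_cons, List.intersperse]
      simp
    | cons b t =>
      simp only [List.cons_append] at *
      rw [List.intersperse_cons₂, List.intersperse_cons₂, List.flatten_cons,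
        List.flatten_cons, ih]
      simp

theorem join_push (xs : List Char) (h : ')' ∉ xs) :
    ∀ (cur : List Char) (stack : List (List Char)),
      joinStack (pushSt xs (cur, stack)).1 (pushSt xs (cur, stack)).2 = joinStack cur stack ++ xs := by
  induction xs with
  | nil => intro cur stack; simp [pushSt]
  | cons c xs ih =>
    rw [List.mem_cons] at h
    push Not at h
    intro cur stack
    by_cases h1 : c = '('
    · subst h1
      rw [pushSt]
      simp only [reduceIte]
      rw [ih h.2]
      simp only [joinStack, List.intercalate, List.reverse_cons]
      rw [inter_nil_snoc]
      simp
    · rw [pushSt]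
      simp only [if_neg h1]
      rw [ih h.2]
      simp only [joinStack, List.intercalate, List.reverse_cons]
      rw [show cur ++ [c] = cur ++ [c] from rfl, inter_snoc]
      simp

theorem scan_noR (s : List Char) (h : ')' ∉ s) : scanB s [] [] = s := by
  have := scan_push s h [] [] []
  simp at this
  rw [this, scanB, join_push s h [] []]
  simp [joinStack, List.intercalate]

theorem scan_stop (p post : List Char) (h1 : ')' ∉ p) (h2 : '(' ∉ p) :
    scanB (p ++ ')' :: post) [] [] = p ++ ')' :: post := by
  rw [scan_push p h1 (')' :: post) [] [], push_plain p h1 h2 [] []]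
  rw [scanB.eq_def]
  simp

theorem scan_all (xs : List Char) (h : ')' ∉ xs) (cur : List Char) (stack : List (List Char)) :
    scanB xs cur stack = joinStack cur stack ++ xs := by
  have hpp := scan_push xs h [] cur stack
  rw [List.append_nil] at hpp
  rw [hpp, scanB.eq_def]
  exact join_push xs h cur stack

-- first/last occurrence decompositions
theorem exists_first {c : Char} {s : List Char} (h : c ∈ s) :
    ∃ u v, s = u ++ c :: v ∧ c ∉ u := by
  induction s with
  | nil => cases h
  | cons a s ih =>
    by_cases ha : a = c
    · exact ⟨[], s, by simp [ha], by simp⟩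
    · have hs : c ∈ s := by
        rcases List.mem_cons.mp h with h' | h'
        · exact absurd h'.symm ha
        · exact h'
      obtain ⟨u, v, huv, hu⟩ := ih hs
      exact ⟨a :: u, v, by simp [huv], by simp [hu]; exact fun hc => ha hc.symm⟩

theorem exists_last {c : Char} {s : List Char} (h : c ∈ s) :
    ∃ u v, s = u ++ c :: v ∧ c ∉ v := by
  induction s with
  | nil => cases h
  | cons a s ih =>
    by_cases hs : c ∈ s
    · obtain ⟨u, v, huv, hv⟩ := ih hs
      exact ⟨a :: u, v, by simp [huv], hv⟩
    · have ha : a = c := by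
        rcases List.mem_cons.mp h with h' | h'
        · exact h'.symm
        · exact absurd h' hs
      exact ⟨[], s, by simp [ha], hs⟩

-- find / rfind characterisations (single-character needle)




theorem go_notMem (c : Char) (s : List Char) (k : Nat) (h : c ∉ s) : PySem.Chars.find.go [c] s k = -1 := by
  induction s generalizing k with
  | nil => simp [PySem.Chars.find.go]
  | cons a s ih =>
    rw [List.mem_cons] at h
    push Not at h
    have hp : [c].isPrefixOf (a :: s) = false := by
      simp [List.isPrefixOf]; exact h.1
    rw [PySem.Chars.find.go.eq_def]
    simp only [hp]
    simpa using ih (k+1) h.2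
theorem go_first (c : Char) (u v : List Char) (h : c ∉ u) : ∀ k, PySem.Chars.find.go [c] (u ++ c :: v) k = (k : Int) + u.length := by
  induction u with
  | nil =>
    intro k
    have hp : [c].isPrefixOf (c :: v) = true := by simp [List.isPrefixOf]
    rw [List.nil_append, PySem.Chars.find.go.eq_def]
    simp [hp]
  | cons a u ih =>
    rw [List.mem_cons] at h
    push Not at h
    intro k
    have hp : [c].isPrefixOf (a :: (u ++ c :: v)) = false := by
      simp [List.isPrefixOf]; exact h.1
    rw [List.cons_append, PySem.Chars.find.go.eq_def]
    simp only [hp]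
    rw [show ((a :: u).length : Int) = (u.length : Int) + 1 by push_cast [List.length_cons]; ring]
    simp only [ih h.2 (k+1)]
    push_cast
    ring
theorem find_notMem (s : List Char) (c : Char) (h : c ∉ s) : PySem.Chars.find s [c] = -1 := go_notMem c s 0 h
theorem find_first (u v : List Char) (c : Char) (h : c ∉ u) : PySem.Chars.find (u ++ c :: v) [c] = (u.length : Int) := by
  have := go_first c u v h 0
  simpa [PySem.Chars.find] using this

theorem mem_of_prefix_singleton {c : Char} {l : List Char} (h : [c].isPrefixOf l = true) : c ∈ l := by
  have := List.isPrefixOf_iff_prefix.mp h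
  exact this.subset (by simp)
theorem pre_false (c : Char) (u v : List Char) (hv : c ∉ v) :
    ∀ j, u.length < j → [c].isPrefixOf (List.drop j (u ++ c :: v)) = false := by
  intro j hj
  by_contra hb
  rw [Bool.not_eq_false] at hb
  have hc := mem_of_prefix_singleton hb
  have : List.drop j (u ++ c :: v) = List.drop (j - u.length - 1) v := by
    rw [show j = u.length + (j - u.length) by omega, List.drop_append]
    rw [show j - u.length = (j - u.length - 1) + 1 by omega]
    simp
  rw [this] at hc
  exact hv (List.mem_of_mem_drop hc)
theorem rgo_notMem (c : Char) (s : List Char) (h : c ∉ s) : ∀ k, PySem.Chars.rfind.go s [c] k = -1 := by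
  have hp : ∀ j, [c].isPrefixOf (List.drop j s) = false := by
    intro j
    by_contra hb
    rw [Bool.not_eq_false] at hb
    exact h (List.mem_of_mem_drop (mem_of_prefix_singleton hb))
  intro k
  induction k with
  | zero =>
    rw [PySem.Chars.rfind.go.eq_def]
    have := hp 0
    simp at this
    simp [this]
  | succ j ih =>
    rw [PySem.Chars.rfind.go.eq_def]
    simp only [hp (j+1)]
    simpa using ih
theorem rgo_last (c : Char) (u v : List Char) (hv : c ∉ v) :
    ∀ k, u.length ≤ k → PySem.Chars.rfind.go (u ++ c :: v) [c] k = (u.length : Int) := by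
  intro k
  induction k with
  | zero =>
    intro hk
    have hu0 : u = [] := by
      cases u with | nil => rfl | cons a t => simp at hk
    subst hu0
    rw [PySem.Chars.rfind.go.eq_def]
    simp [List.isPrefixOf]
  | succ j ih =>
    intro hk
    by_cases he : u.length = j + 1
    · have hd : List.drop (j+1) (u ++ c :: v) = c :: v := by
        rw [← he, List.drop_left]
      rw [PySem.Chars.rfind.go.eq_def]
      simp [hd, he, List.isPrefixOf]
    · have hlt : u.length ≤ j := by omega
      rw [PySem.Chars.rfind.go.eq_def]
      simp only [pre_false c u v hv (j+1) (by omega)]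
      simpa using ih hlt
theorem rfind_notMem (s : List Char) (c : Char) (h : c ∉ s) : PySem.Chars.rfind s [c] = -1 :=
  rgo_notMem c s h s.length
theorem rfind_last (u v : List Char) (c : Char) (hv : c ∉ v) :
    PySem.Chars.rfind (u ++ c :: v) [c] = (u.length : Int) := by
  have := rgo_last c u v hv (u ++ c :: v).length (by simp)
  simpa [PySem.Chars.rfind] using this


-- digits
theorem char_eq_of_toNat {d e : Char} (h : d.toNat = e.toNat) : d = e :=
  Char.ext (UInt32.toNat_inj.mp h)

theorem digit_cases (d : Char) (h : PySem.Chars.isdigit d = true) :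
    d ∈ ['0','1','2','3','4','5','6','7','8','9'] := by
  have hb : 48 ≤ d.toNat ∧ d.toNat ≤ 57 := by
    simp only [PySem.Chars.isdigit, Bool.and_eq_true, decide_eq_true_eq, Char.le_def,
      UInt32.le_iff_toNat_le] at h
    simp only [Char.toNat]
    exact ⟨by simpa using h.1, by simpa using h.2⟩
  have hd : d.toNat = 48 ∨ d.toNat = 49 ∨ d.toNat = 50 ∨ d.toNat = 51 ∨ d.toNat = 52 ∨
      d.toNat = 53 ∨ d.toNat = 54 ∨ d.toNat = 55 ∨ d.toNat = 56 ∨ d.toNat = 57 := by omega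
  rcases hd with h|h|h|h|h|h|h|h|h|h
  · simp [char_eq_of_toNat (e := '0') (h.trans (by decide))]
  · simp [char_eq_of_toNat (e := '1') (h.trans (by decide))]
  · simp [char_eq_of_toNat (e := '2') (h.trans (by decide))]
  · simp [char_eq_of_toNat (e := '3') (h.trans (by decide))]
  · simp [char_eq_of_toNat (e := '4') (h.trans (by decide))]
  · simp [char_eq_of_toNat (e := '5') (h.trans (by decide))]
  · simp [char_eq_of_toNat (e := '6') (h.trans (by decide))]
  · simp [char_eq_of_toNat (e := '7') (h.trans (by decide))]
  · simp [char_eq_of_toNat (e := '8') (h.trans (by decide))]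
  · simp [char_eq_of_toNat (e := '9') (h.trans (by decide))]

theorem ofChars_digit (d : Char) (h : PySem.Chars.isdigit d = true) :
    (PySem.Int.ofChars? [d]).getD 1 = (digitVal d : Int) := by
  have := digit_cases d h
  fin_cases this <;> decide

theorem foldl_append_const {α : Type} (m : List α) :
    ∀ (l : List Int) (acc : List α),
      l.foldl (fun a _ => a ++ m) acc = acc ++ (List.replicate l.length m).flatten := by
  intro l
  induction l with
  | nil => simp
  | cons a l ih => intro acc; simp [ih, List.replicate_succ]

-- what rm_1bracket computes on the canonical decomposition
def rmNext (p m v : List Char) : List Char :=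
  match v with
  | d :: rest =>
    if PySem.Chars.isdigit d then p ++ (List.replicate (digitVal d) m).flatten ++ rest
    else p ++ m ++ d :: rest
  | [] => p ++ m

theorem rm_eq (p m v : List Char) (hp : ')' ∉ p) (hm1 : ')' ∉ m) (hm2 : '(' ∉ m) :
    rm_1bracket (p ++ '(' :: (m ++ ')' :: v)) = some (rmNext p m v) := by
  have hassoc : p ++ '(' :: (m ++ ')' :: v) = (p ++ '(' :: m) ++ ')' :: v := by simp
  have hfind : PySem.Chars.find (p ++ '(' :: (m ++ ')' :: v)) [')']
      = ((p.length + 1 + m.length : Nat) : Int) := by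
    rw [hassoc, find_first]
    · simp; omega
    · simp [hp, hm1]
  have hslice0 : PySem.List.slice (p ++ '(' :: (m ++ ')' :: v)) (some 0)
      (some ((p.length + 1 + m.length : Nat) : Int)) = p ++ '(' :: m := by
    rw [PySem.List.slice_zero_start, PySem.List.slice_to_natCast, hassoc]
    rw [show p.length + 1 + m.length = (p ++ '(' :: m).length by simp; omega]
    exact List.take_left
  have hrfind : PySem.Chars.rfind (p ++ '(' :: m) ['('] = (p.length : Int) :=
    rfind_last p m '(' hm2
  have hstrt : (if (↑p.length : Int) = 0 then []
      else PySem.List.slice (p ++ '(' :: (m ++ ')' :: v)) (some 0) (some ↑p.length)) = p := by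
    by_cases hp0 : p = []
    · subst hp0; simp
    · have hne : ¬((p.length : Int) = 0) := by simp [hp0]
      rw [if_neg hne, PySem.List.slice_zero_start, PySem.List.slice_to_natCast]
      exact List.take_left
  have hsliceM : PySem.List.slice (p ++ '(' :: (m ++ ')' :: v)) (some (↑p.length + 1))
      (some ((p.length + 1 + m.length : Nat) : Int)) = m := by
    rw [show ((p.length : Nat) : Int) + 1 = ((p.length + 1 : Nat) : Int) by push_cast; ring,
      PySem.List.slice_natCast]
    rw [show p ++ '(' :: (m ++ ')' :: v) = (p ++ ['(']) ++ (m ++ ')' :: v) by simp,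
      show p.length + 1 = (p ++ ['(']).length by simp]
    rw [List.drop_left,
      show (p ++ ['(']).length + m.length - (p ++ ['(']).length = m.length by omega]
    exact List.take_left
  simp only [rm_1bracket]
  rw [hfind, if_neg (by omega), hslice0, hrfind, if_neg (by omega)]
  cases v with
  | nil =>
    rw [if_pos (show ((p ++ '(' :: (m ++ ')' :: [])).length : Int) = ↑(p.length + 1 + m.length) + 1 by
      simp; omega)]
    rw [hstrt, hsliceM]
    rw [if_pos (show ((p.length + 1 + m.length : Nat) : Int) = ↑(p ++ '(' :: (m ++ ')' :: [])).length - 1 by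
      simp; omega)]
    simp [rmNext, PySem.Chars.strIsdigit, PySem.Chars.isdigit,
      show (PySem.Int.ofChars? ['1']).getD 1 = ((1 : Nat) : Int) by decide]
  | cons d rest =>
    have hlen : ¬ (((p ++ '(' :: (m ++ ')' :: (d :: rest))).length : Int) = ↑(p.length + 1 + m.length) + 1) := by
      simp; omega
    have hget : PySem.List.pyGet? (p ++ '(' :: (m ++ ')' :: (d :: rest)))
        ((↑(p.length + 1 + m.length) : Int) + 1) = some d := by
      rw [show ((p.length + 1 + m.length : Nat) : Int) + 1 = ((p.length + 1 + m.length + 1 : Nat) : Int) by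
        push_cast; ring, PySem.List.pyGet?_natCast, hassoc]
      rw [show p.length + 1 + m.length + 1 = (p ++ '(' :: m).length + 1 by simp; omega]
      rw [List.getElem?_append_right (by omega)]
      simp
    have hdrop1 : PySem.List.slice (p ++ '(' :: (m ++ ')' :: (d :: rest)))
        (some ((↑(p.length + 1 + m.length) : Int) + 1 + 0)) none = d :: rest := by
      rw [show ((p.length + 1 + m.length : Nat) : Int) + 1 + 0 = ((p.length + 1 + m.length + 1 : Nat) : Int) by
        push_cast; ring, PySem.List.slice_from_natCast, hassoc]
      rw [show p ++ '(' :: m ++ ')' :: d :: rest = (p ++ '(' :: m ++ [')']) ++ d :: rest by simp,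
        show p.length + 1 + m.length + 1 = (p ++ '(' :: m ++ [')']).length by simp; omega]
      exact List.drop_left
    have hdrop2 : PySem.List.slice (p ++ '(' :: (m ++ ')' :: (d :: rest)))
        (some ((↑(p.length + 1 + m.length) : Int) + 1 + 1)) none = rest := by
      rw [show ((p.length + 1 + m.length : Nat) : Int) + 1 + 1 = ((p.length + 1 + m.length + 2 : Nat) : Int) by
        push_cast; ring, PySem.List.slice_from_natCast, hassoc]
      rw [show p ++ '(' :: m ++ ')' :: d :: rest = (p ++ '(' :: m ++ [')', d]) ++ rest by simp,
        show p.length + 1 + m.length + 2 = (p ++ '(' :: m ++ [')', d]).length by simp; omega]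
      exact List.drop_left
    have hend : ¬ (((p.length + 1 + m.length : Nat) : Int)
        = ↑(p ++ '(' :: (m ++ ')' :: (d :: rest))).length - 1) := by
      simp; omega
    rw [if_neg hlen, hget, hstrt, if_neg hend]
    simp only [Option.getD_some]
    have hsd : PySem.Chars.strIsdigit [d] = PySem.Chars.isdigit d := by
      simp [PySem.Chars.strIsdigit]
    rw [hsd]
    by_cases hdig : PySem.Chars.isdigit d = true
    · rw [if_neg (by simp [hdig]), ofChars_digit d hdig, PySem.List.pyRange_zero_natCast,
        foldl_append_const, hsliceM, hdrop2]
      simp [rmNext, hdig]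
    · rw [if_pos (by simpa using hdig)]
      rw [show (PySem.Int.ofChars? ['1']).getD 1 = ((1 : Nat) : Int) by decide,
        PySem.List.pyRange_zero_natCast, foldl_append_const, hsliceM, hdrop1]
      simp [rmNext, hdig]

theorem slice_take (u v : List Char) :
    PySem.List.slice (u ++ v) (some 0) (some (u.length : Int)) = u := by
  rw [PySem.List.slice_zero_start, PySem.List.slice_to_natCast]
  exact List.take_left

theorem notMem_flatten_replicate {c : Char} {m : List Char} (h : c ∉ m) (k : Nat) :
    c ∉ (List.replicate k m).flatten := by
  intro hc
  rw [List.mem_flatten] at hc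
  obtain ⟨l, hlmem, hcl⟩ := hc
  rw [List.eq_of_mem_replicate hlmem] at hcl
  exact h hcl

theorem rm_none_spec (s : List Char) (h : rm_1bracket s = none) :
    ')' ∉ s ∨ ∃ u v, s = u ++ ')' :: v ∧ ')' ∉ u ∧ '(' ∉ u := by
  by_cases hr : ')' ∈ s
  · obtain ⟨u, v, huv, hu⟩ := exists_first hr
    by_cases hl : '(' ∈ u
    · obtain ⟨p, m, hpm, hm⟩ := exists_last hl
      have hs : s = p ++ '(' :: (m ++ ')' :: v) := by simp [huv, hpm]
      have hp' : ')' ∉ p := fun hc => hu (hpm ▸ List.mem_append_left _ hc)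
      have hm1 : ')' ∉ m := fun hc => hu (hpm ▸ List.mem_append_right _ (List.mem_cons_of_mem _ hc))
      rw [hs, rm_eq p m v hp' hm1 hm] at h
      cases h
    · exact Or.inr ⟨u, v, huv, hu, hl⟩
  · exact Or.inl hr

theorem rm_some_decomp (s t : List Char) (h : rm_1bracket s = some t) :
    ∃ p m v, s = p ++ '(' :: (m ++ ')' :: v) ∧ ')' ∉ p ∧ ')' ∉ m ∧ '(' ∉ m ∧ t = rmNext p m v := by
  by_cases hr : ')' ∈ s
  · obtain ⟨u, v, huv, hu⟩ := exists_first hr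
    by_cases hl : '(' ∈ u
    · obtain ⟨p, m, hpm, hm⟩ := exists_last hl
      have hs : s = p ++ '(' :: (m ++ ')' :: v) := by simp [huv, hpm]
      have hp' : ')' ∉ p := fun hc => hu (hpm ▸ List.mem_append_left _ hc)
      have hm1 : ')' ∉ m := fun hc => hu (hpm ▸ List.mem_append_right _ (List.mem_cons_of_mem _ hc))
      refine ⟨p, m, v, hs, hp', hm1, hm, ?_⟩
      rw [hs, rm_eq p m v hp' hm1 hm] at h
      exact (Option.some_inj.mp h).symm
    · exfalso
      rw [huv] at h
      simp only [rm_1bracket, find_first u v ')' hu] at h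
      rw [if_neg (by omega), slice_take, rfind_notMem u '(' hl] at h
      simp at h
  · exfalso
    simp only [rm_1bracket, find_notMem s ')' hr] at h
    simp at h

theorem scan_step (p m v : List Char) (hp : ')' ∉ p) (hm1 : ')' ∉ m) (hm2 : '(' ∉ m) :
    scanB (p ++ '(' :: (m ++ ')' :: v)) [] [] = scanB (rmNext p m v) [] [] := by
  rw [scan_push p hp ('(' :: (m ++ ')' :: v)) [] []]
  rw [scanB.eq_def]
  simp only [reduceIte]
  rw [scan_push m hm1 (')' :: v) [] ((pushSt p ([], [])).1 :: (pushSt p ([], [])).2),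
    push_plain m hm1 hm2]
  simp only [List.nil_append]
  rw [scanB.eq_def]
  simp only [reduceIte]
  cases v with
  | nil =>
    rw [show rmNext p m [] = p ++ m from rfl, scan_all (p ++ m) (by simp [hp, hm1]) [] []]
    have e1 : joinStack ((pushSt p ([], [])).1 ++ m) (pushSt p ([], [])).2
        = joinStack (pushSt p ([], [])).1 (pushSt p ([], [])).2 ++ m := by
      have e0 := join_push m hm1 (pushSt p ([], [])).1 (pushSt p ([], [])).2
      rwa [push_plain m hm1 hm2] at e0
    rw [e1, join_push p hp [] []]
    simp [joinStack, List.intercalate]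
  | cons d rest =>
    by_cases hdig : PySem.Chars.isdigit d = true
    · simp only [hdig, reduceIte]
      rw [show rmNext p m (d :: rest)
          = p ++ ((List.replicate (digitVal d) m).flatten ++ rest) by simp [rmNext, hdig]]
      rw [scan_push p hp ((List.replicate (digitVal d) m).flatten ++ rest) [] []]
      rw [scan_push ((List.replicate (digitVal d) m).flatten)
        (notMem_flatten_replicate hm1 _) rest (pushSt p ([], [])).1 (pushSt p ([], [])).2]
      rw [push_plain ((List.replicate (digitVal d) m).flatten)
        (notMem_flatten_replicate hm1 _) (notMem_flatten_replicate hm2 _)]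
      rw [if_neg (show ¬(')' = '(') by decide)]
    · simp only [hdig]
      rw [show rmNext p m (d :: rest) = p ++ (m ++ d :: rest) by simp [rmNext, hdig]]
      rw [scan_push p hp (m ++ d :: rest) [] []]
      rw [scan_push m hm1 (d :: rest) (pushSt p ([], [])).1 (pushSt p ([], [])).2,
        push_plain m hm1 hm2]
      rw [if_neg (show ¬(')' = '(') by decide), if_neg (show ¬(false = true) by decide)]

theorem count_rmNext (p m v : List Char) (hm1 : ')' ∉ m) :
    (rmNext p m v).count ')' < (p ++ '(' :: (m ++ ')' :: v)).count ')' := by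
  have hm0 : m.count ')' = 0 := List.count_eq_zero.mpr hm1
  cases v with
  | nil => simp [rmNext, List.count_append, hm0]
  | cons d rest =>
    by_cases hdig : PySem.Chars.isdigit d = true
    · have hf : ((List.replicate (digitVal d) m).flatten).count ')' = 0 :=
        List.count_eq_zero.mpr (notMem_flatten_replicate hm1 _)
      simp [rmNext, hdig, List.count_append, List.count_cons, hm0, hf]
    · simp [rmNext, hdig, List.count_append, List.count_cons, hm0]

theorem loop_eq_scan : ∀ (fuel : Nat) (s : List Char), s.count ')' ≤ fuel →
    stripLoop fuel s = scanB s [] [] := by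
  intro fuel
  induction fuel with
  | zero =>
    intro s hc
    have h0 : ')' ∉ s := by
      have : s.count ')' = 0 := by omega
      exact List.count_eq_zero.mp this
    exact (scan_noR s h0).symm
  | succ f ih =>
    intro s hc
    cases h : rm_1bracket s with
    | none =>
      simp only [stripLoop, h]
      rcases rm_none_spec s h with h0 | ⟨u, v, huv, hu, hl⟩
      · exact (scan_noR s h0).symm
      · rw [huv]
        exact (scan_stop u v hu hl).symm
    | some t =>
      simp only [stripLoop, h]
      obtain ⟨p, m, v, hs, hp', hm1, hm2, ht⟩ := rm_some_decomp s t h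
      have hlt : t.count ')' < s.count ')' := by
        rw [ht, hs]
        exact count_rmNext p m v hm1
      rw [ih t (by omega), ht, hs]
      exact (scan_step p m v hp' hm1 hm2).symm

-- ===== VERDICT (by name: the statement is the Claim_ definition above) =====
theorem strip_bracket_spec : Claim_equal_strip_bracket := by
  intro s _
  unfold Spec_strip_bracket strip_bracket strip_bracket_alt
  rw [loop_eq_scan _ _ (List.count_le_length)]
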